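-- pv_equiv track=rewrite | github.com/MateoLostanlen/pyro-scrapper | split_cams.py | group_by_close_values
-- ===== SOURCE A (Python) =====
-- from collections import defaultdict
--
-- def group_by_close_values(data, threshold):
--     """Group items based on close numerical values."""
--     sorted_items = sorted(data.items(), key=lambda x: x[1])
--     groups = defaultdict(list)
--     group_id = 0
--
--     for i, item in enumerate(sorted_items):
--         if i == 0 or abs(item[1] - sorted_items[i - 1][1]) <= threshold:
--             groups[group_id].append(item)
--         else:
--             group_id += 1
--             groups[group_id].append(item)
--
--     return groups
-- ===== SOURCE B (Python) =====
-- from collections import defaultdict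
-- from itertools import accumulate
--
-- def group_by_close_values(data, threshold):
--     """Group items based on close numerical values."""
--     items = sorted(data.items(), key=lambda x: x[1])
--     flags = [1 if abs(b[1] - a[1]) > threshold else 0
--              for a, b in zip(items, items[1:])]
--     ids = accumulate(flags, initial=0)
--     groups = defaultdict(list)
--     for gid, item in zip(ids, items):
--         groups[gid].append(item)
--     return groups
-- ===== Notes on version B (the rewrite author's own statement) =====
-- stated objective: alternative
-- what changed: B replaces A's stateful single scan (carried group_id counter, in-loop defaultdict appends) by staged passes: a list of break flags over consecutive sorted pairs, itertools.accumulate prefix-sums for per-item group ids, and a final zip that distributes items into the dict.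
import Mathlib
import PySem

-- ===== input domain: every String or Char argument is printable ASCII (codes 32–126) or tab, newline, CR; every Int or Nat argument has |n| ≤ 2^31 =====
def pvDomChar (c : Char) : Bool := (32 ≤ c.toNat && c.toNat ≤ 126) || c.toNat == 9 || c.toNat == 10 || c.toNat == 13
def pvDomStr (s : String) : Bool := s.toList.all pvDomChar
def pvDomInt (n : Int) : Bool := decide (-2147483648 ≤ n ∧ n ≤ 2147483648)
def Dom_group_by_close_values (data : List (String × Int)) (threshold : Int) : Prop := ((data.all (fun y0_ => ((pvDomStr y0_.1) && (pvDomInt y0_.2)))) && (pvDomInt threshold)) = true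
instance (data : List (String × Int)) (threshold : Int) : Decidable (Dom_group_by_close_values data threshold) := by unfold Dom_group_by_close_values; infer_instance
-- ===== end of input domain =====

-- B replaces A's stateful single scan (carried group_id counter, in-loop appends) by staged
-- passes: break flags over consecutive sorted pairs, accumulate prefix sums for group ids,
-- then a zip distributing items into the dict (objective: alternative decomposition, same cost).

-- ===== PORT A =====
-- loop body of A's 'for i, item in enumerate(sorted_items)' (condition, defaultdict append, group_id)
def pvAStep (sorted_items : List (String × Int)) (threshold : Int)
    (st : PySem.Dict Int (List (String × Int)) × Int) (p : Int × (String × Int)) :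
    PySem.Dict Int (List (String × Int)) × Int :=
  if p.1 = 0 ∨ |p.2.2 - (PySem.List.pyGetD sorted_items (p.1 - 1) ("", 0)).2| ≤ threshold then
    (st.1.modify st.2 [] (· ++ [p.2]), st.2)
  else
    (st.1.modify (st.2 + 1) [] (· ++ [p.2]), st.2 + 1)

def group_by_close_values (data : List (String × Int)) (threshold : Int) :
    List (Int × List (String × Int)) :=
  let sorted_items := PySem.List.sorted (PySem.Dict.ofList data).items (fun x => x.2)
  ((PySem.List.enumerate sorted_items).foldl (pvAStep sorted_items threshold)
    (PySem.Dict.empty, 0)).1.items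

-- ===== PORT B =====
-- B's flags comprehension: 1 when abs(b[1]-a[1]) > threshold over zip(items, items[1:])
def pvFlags (threshold : Int) (items : List (String × Int)) : List Int :=
  (items.zip items.tail).map (fun p => if threshold < |p.2.2 - p.1.2| then 1 else 0)

-- B's ids = accumulate(flags, initial=0) (scanl keeps the leading 0)
def pvIds (threshold : Int) (items : List (String × Int)) : List Int :=
  (pvFlags threshold items).scanl (· + ·) 0

-- B's final loop: 'for gid, item in zip(ids, items): groups[gid].append(item)'
def pvBDict (threshold : Int) (items : List (String × Int)) :
    PySem.Dict Int (List (String × Int)) :=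
  ((pvIds threshold items).zip items).foldl
    (fun d p => d.modify p.1 [] (· ++ [p.2])) PySem.Dict.empty

def group_by_close_values_alt (data : List (String × Int)) (threshold : Int) :
    List (Int × List (String × Int)) :=
  let items := PySem.List.sorted (PySem.Dict.ofList data).items (fun x => x.2)
  (pvBDict threshold items).items

-- ===== PRECONDITION & SPEC =====
def Spec_group_by_close_values (data : List (String × Int)) (threshold : Int) (out : List (Int × List (String × Int))) : Prop := out = group_by_close_values_alt data threshold
instance (data : List (String × Int)) (threshold : Int) (out : List (Int × List (String × Int))) : Decidable (Spec_group_by_close_values data threshold out) := by unfold Spec_group_by_close_values; infer_instance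

-- ===== CLAIM (what is proved, stated in full; the proofs are below) =====
def Claim_equal_group_by_close_values : Prop := ∀ (data : List (String × Int)) (threshold : Int), Dom_group_by_close_values data threshold → Spec_group_by_close_values data threshold (group_by_close_values data threshold)

-- ===== LEMMAS AND PROOFS =====

-- A's carried group_id after processing l (0 for empty input, else the sum of B's flags)
def pvGid (threshold : Int) (l : List (String × Int)) : Int :=
  if l = [] then 0 else (pvFlags threshold l).foldl (· + ·) 0

lemma pvZipTailConcat {α : Type} (l : List α) (x d : α) (h : l ≠ []) :
    (l ++ [x]).zip ((l ++ [x]).tail) = l.zip l.tail ++ [(l.getLastD d, x)] := by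
  induction l with
  | nil => exact absurd rfl h
  | cons a m ih =>
    cases m with
    | nil => simp
    | cons b m' =>
      have := ih (by simp)
      simp only [List.cons_append, List.tail_cons, List.zip_cons_cons] at this ⊢
      rw [this]
      simp

lemma pvScanlConcat (fs : List Int) (a f : Int) :
    List.scanl (· + ·) a (fs ++ [f]) = List.scanl (· + ·) a fs ++ [fs.foldl (· + ·) a + f] := by
  induction fs generalizing a with
  | nil => simp [List.scanl]
  | cons g gs ih => simp only [List.cons_append, List.scanl_cons, List.foldl_cons, ih]

lemma pvFlagsLen (t : Int) (l : List (String × Int)) :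
    (pvFlags t l).length = l.length - 1 := by
  unfold pvFlags
  rw [List.length_map, List.length_zip, List.length_tail]
  omega

lemma pvIdsLen (t : Int) (l : List (String × Int)) (h : l ≠ []) :
    (pvIds t l).length = l.length := by
  unfold pvIds
  rw [List.length_scanl, pvFlagsLen t l]
  have : 1 ≤ l.length := List.length_pos_iff.mpr h
  omega

lemma pvFlagsConcat (t : Int) (l : List (String × Int)) (x : String × Int) (h : l ≠ []) :
    pvFlags t (l ++ [x])
      = pvFlags t l ++ [if t < |x.2 - (l.getLastD ("", 0)).2| then 1 else 0] := by
  unfold pvFlags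
  rw [pvZipTailConcat l x ("", 0) h, List.map_append]
  rfl

lemma pvMain (t : Int) (l : List (String × Int)) :
    (PySem.List.enumerate l 0).foldl (pvAStep l t) (PySem.Dict.empty, 0)
      = (pvBDict t l, pvGid t l) := by
  induction l using List.reverseRecOn with
  | nil =>
    simp [PySem.List.enumerate_nil, pvBDict, pvIds, pvFlags, pvGid]
  | append_singleton l' x ih =>
    rw [PySem.List.enumerate_append]
    simp only [PySem.List.enumerate_cons, PySem.List.enumerate_nil]
    rw [List.foldl_append]
    have hpre : List.foldl (pvAStep (l' ++ [x]) t) (PySem.Dict.empty, 0) (PySem.List.enumerate l' 0)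
        = List.foldl (pvAStep l' t) (PySem.Dict.empty, 0) (PySem.List.enumerate l' 0) := by
      apply PySem.List.foldl_congr_mem
      intro acc p hp
      obtain ⟨k, hk, rfl⟩ := (PySem.List.mem_enumerate_iff l' 0 p).mp hp
      by_cases hk0 : k = 0
      · subst hk0
        unfold pvAStep
        rw [if_pos (Or.inl (by norm_num)), if_pos (Or.inl (by norm_num))]
      · have h1 : ((0 : Int) + (k : Int) - 1) = ((k - 1 : Nat) : Int) := by omega
        unfold pvAStep
        rw [h1, PySem.List.pyGetD_natCast, PySem.List.pyGetD_natCast,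
            List.getD_append _ _ _ _ (by omega)]
    rw [hpre, ih, List.foldl_cons, List.foldl_nil]
    by_cases hl' : l' = []
    · subst hl'
      unfold pvAStep pvBDict pvIds pvGid
      simp [pvFlags]
    · have h1 : 1 ≤ l'.length := List.length_pos_iff.mpr hl'
      have hprev : PySem.List.pyGetD (l' ++ [x]) ((0 : Int) + (l'.length : Int) - 1) ("", 0)
          = l'.getLastD ("", 0) := by
        have hlen : ((0 : Int) + (l'.length : Int) - 1) = ((l'.length - 1 : Nat) : Int) := by omega
        rw [hlen, PySem.List.pyGetD_natCast, List.getD_append _ _ _ _ (by omega)]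
        rw [List.getD_eq_getElem?_getD, ← List.getLast?_eq_getElem?, List.getLastD_eq_getLast?]
      -- B's dict on l' ++ [x] is B's dict on l' followed by one modify
      have hids : pvIds t (l' ++ [x])
          = pvIds t l' ++ [pvGid t l' + (if t < |x.2 - (l'.getLastD ("", 0)).2| then 1 else 0)] := by
        unfold pvIds
        rw [pvFlagsConcat t l' x hl', pvScanlConcat]
        unfold pvGid
        rw [if_neg hl']
      have hzip : (pvIds t (l' ++ [x])).zip (l' ++ [x])
          = (pvIds t l').zip l'
            ++ [(pvGid t l' + (if t < |x.2 - (l'.getLastD ("", 0)).2| then 1 else 0), x)] := by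
        rw [hids, List.zip_append (by rw [pvIdsLen t l' hl'])]
        rfl
      have hB : pvBDict t (l' ++ [x])
          = (pvBDict t l').modify
              (pvGid t l' + (if t < |x.2 - (l'.getLastD ("", 0)).2| then 1 else 0)) []
              (· ++ [x]) := by
        unfold pvBDict
        rw [hzip, List.foldl_append, List.foldl_cons, List.foldl_nil]
      have hG : pvGid t (l' ++ [x])
          = pvGid t l' + (if t < |x.2 - (l'.getLastD ("", 0)).2| then 1 else 0) := by
        unfold pvGid
        rw [if_neg (by simp), if_neg hl', pvFlagsConcat t l' x hl', List.foldl_append]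
        rfl
      unfold pvAStep
      simp only [hprev]
      have hne : ((0 : Int) + (l'.length : Int)) ≠ 0 := by omega
      by_cases hc : |x.2 - (l'.getLastD ("", 0)).2| ≤ t
      · rw [if_pos (Or.inr hc), hB, hG]
        rw [if_neg (by omega)]
        simp
      · rw [if_neg (by simp only [not_or]; exact ⟨hne, hc⟩), hB, hG]
        rw [if_pos (by omega)]

-- ===== VERDICT (by name: the statement is the Claim_ definition above) =====
theorem group_by_close_values_spec : Claim_equal_group_by_close_values := by
  intro data threshold _
  unfold Spec_group_by_close_values group_by_close_values group_by_close_values_alt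
  dsimp only
  rw [pvMain]
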